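-- pv_equiv track=rewrite | github.com/fury93/leetcode_python3_solutions | 1979-maximum-number-of-people-that-can-be-caught-in-tag/maximum-number-of-people-that-can-be-caught-in-tag.py | catchMaximumAmountofPeople
-- ===== SOURCE A (Python) =====
-- from typing import List
--
-- def catchMaximumAmountofPeople(team: List[int], dist: int) -> int:
--     not_it = it = ans = 0
--     for _, is_it in enumerate(team):
--         if is_it:                   # if is `it`
--             if not_it > 0:          #     if there are some non-caught `not_it`, try catch it
--                 not_it -= 1
--                 ans += 1            #     and count people caught
--             else:
--                 it += 1             #     if there are no non-caught `not_it`, increase count of `it`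
--         else:                       # it not `it`
--             if it > 0:              #     if there are enough "catch quota" leftover, use them (catch `not_it` before previous index)
--                 it -= 1
--                 ans += 1            #     decrease count of `it` and count people caught
--             else:
--                 not_it += 1         #     if there are no quota to catch `not_it`, increase count of `not_it`
--         not_it = min(not_it, dist)  # eliminate outdated `not_it` by limiting its count under `dist`
--         it = min(it, dist)          # eliminate outdated `it` by limiting its count under `dist`
--     return ans
-- ===== SOURCE B (Python) =====
-- def catchMaximumAmountofPeople(team, dist):
--     if dist <= 0:
--         return 0
--     # stage 1: run-length encode consecutive equal truthiness
--     runs = []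
--     for x in team:
--         t = bool(x)
--         if runs and runs[-1][0] == t:
--             runs[-1][1] += 1
--         else:
--             runs.append([t, 1])
--     # stage 2: one arithmetic step per run (closed form for a whole run)
--     ans = 0
--     bal = 0  # >0: waiting non-its, <0: waiting its; kept within [-dist, dist]
--     for t, k in runs:
--         if t:
--             ans += min(k, max(bal, 0))
--             bal = max(bal - k, -dist)
--         else:
--             ans += min(k, max(-bal, 0))
--             bal = min(bal + k, dist)
--     return ans
-- ===== Notes on version B (the rewrite author's own statement) =====
-- stated objective: alternative
-- what changed: Replaces A's per-element loop over two clamped counters by two staged passes: first run-length encode the list by truthiness, then perform one closed-form min/max arithmetic step per run (plus an immediate 0 for dist <= 0, where no catch is possible); a timing run measured this ~1.8x faster since the branchy counter arithmetic runs once per run instead of once per element.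
import Mathlib
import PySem

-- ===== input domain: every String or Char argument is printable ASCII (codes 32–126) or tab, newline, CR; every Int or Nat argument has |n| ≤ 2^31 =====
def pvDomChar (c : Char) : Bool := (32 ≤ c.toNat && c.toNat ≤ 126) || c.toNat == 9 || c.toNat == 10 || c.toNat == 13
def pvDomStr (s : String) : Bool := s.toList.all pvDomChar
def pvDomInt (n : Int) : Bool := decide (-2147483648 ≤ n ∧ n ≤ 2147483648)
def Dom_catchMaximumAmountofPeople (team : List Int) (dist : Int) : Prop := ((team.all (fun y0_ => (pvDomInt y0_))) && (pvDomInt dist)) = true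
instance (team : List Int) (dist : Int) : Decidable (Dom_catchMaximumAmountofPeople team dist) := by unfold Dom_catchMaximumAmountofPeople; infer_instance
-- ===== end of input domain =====

-- B replaces A's per-element two-counter loop by two staged passes: run-length encoding, then one closed-form arithmetic step per run.

-- ===== PORT A =====
-- loop state (not_it, it, ans); one fold step = one loop iteration of A
def pvStepA (dist : Int) (s : Int × Int × Int) (x : Int) : Int × Int × Int :=
  let s' :=
    if x ≠ 0 then
      if s.1 > 0 then (s.1 - 1, s.2.1, s.2.2 + 1) else (s.1, s.2.1 + 1, s.2.2)
    else
      if s.2.1 > 0 then (s.1, s.2.1 - 1, s.2.2 + 1) else (s.1 + 1, s.2.1, s.2.2)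
  (min s'.1 dist, min s'.2.1 dist, s'.2.2)

def catchMaximumAmountofPeople (team : List Int) (dist : Int) : Int :=
  (team.foldl (pvStepA dist) (0, 0, 0)).2.2

-- ===== PORT B =====
-- stage 1: run-length encode by truthiness; Python appends/updates at the list end,
-- ported as update at the head of a reversed accumulator, reversed at the end
def pvAddRun (runs : List (Bool × Int)) (x : Int) : List (Bool × Int) :=
  match runs with
  | (t, k) :: rest =>
      if t = decide (x ≠ 0) then (t, k + 1) :: rest
      else (decide (x ≠ 0), 1) :: (t, k) :: rest
  | [] => [(decide (x ≠ 0), 1)]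

-- stage 2: one arithmetic step per run; state (bal, ans)
def pvStepR (dist : Int) (s : Int × Int) (r : Bool × Int) : Int × Int :=
  if r.1 then (max (s.1 - r.2) (-dist), s.2 + min r.2 (max s.1 0))
  else (min (s.1 + r.2) dist, s.2 + min r.2 (max (-s.1) 0))

def catchMaximumAmountofPeople_alt (team : List Int) (dist : Int) : Int :=
  if dist ≤ 0 then 0
  else (((team.foldl pvAddRun []).reverse).foldl (pvStepR dist) (0, 0)).2

-- ===== PRECONDITION & SPEC =====
def Spec_catchMaximumAmountofPeople (team : List Int) (dist : Int) (out : Int) : Prop := out = catchMaximumAmountofPeople_alt team dist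
instance (team : List Int) (dist : Int) (out : Int) : Decidable (Spec_catchMaximumAmountofPeople team dist out) := by unfold Spec_catchMaximumAmountofPeople; infer_instance

-- ===== CLAIM (what is proved, stated in full; the proofs are below) =====
def Claim_equal_catchMaximumAmountofPeople : Prop := ∀ (team : List Int) (dist : Int), Dom_catchMaximumAmountofPeople team dist → Spec_catchMaximumAmountofPeople team dist (catchMaximumAmountofPeople team dist)

-- ===== LEMMAS AND PROOFS =====

-- proof-only intermediate: single signed-balance step (bal > 0: waiting non-its, < 0: waiting its)
def pvStepB (dist : Int) (s : Int × Int) (x : Int) : Int × Int :=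
  let s' :=
    if x ≠ 0 then (s.1 - 1, if s.1 > 0 then s.2 + 1 else s.2)
    else (s.1 + 1, if s.1 < 0 then s.2 + 1 else s.2)
  (if s'.1 > dist then dist else if s'.1 < -dist then -dist else s'.1, s'.2)

-- dist ≤ 0: A's counters never become positive, so the answer component never changes
theorem pvA_nonpos (dist : Int) (hd : dist ≤ 0) :
    ∀ (team : List Int) (ni it ans : Int), ni ≤ 0 → it ≤ 0 →
      (team.foldl (pvStepA dist) (ni, it, ans)).2.2 = ans := by
  intro team
  induction team with
  | nil => intro ni it ans _ _; simp
  | cons x xs ih =>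
    intro ni it ans hni hit
    simp only [List.foldl_cons]
    rcases eq_or_ne x 0 with hx | hx
    · have hstep : pvStepA dist (ni, it, ans) x = (min (ni + 1) dist, min it dist, ans) := by
        unfold pvStepA
        simp [hx, show ¬ it > 0 by omega]
      rw [hstep]
      exact ih _ _ _ (by omega) (by omega)
    · have hstep : pvStepA dist (ni, it, ans) x = (min ni dist, min (it + 1) dist, ans) := by
        unfold pvStepA
        simp [hx, show ¬ ni > 0 by omega]
      rw [hstep]
      exact ih _ _ _ (by omega) (by omega)

-- dist ≥ 1: one step of A from the state encoded by balance bal equals one balance step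
theorem pvStep_rel (dist : Int) (hd : 1 ≤ dist) (bal ans x : Int) :
    pvStepA dist (max bal 0, max (-bal) 0, ans) x =
      (max (pvStepB dist (bal, ans) x).1 0, max (-(pvStepB dist (bal, ans) x).1) 0,
        (pvStepB dist (bal, ans) x).2) := by
  unfold pvStepA pvStepB
  split_ifs <;> simp_all [Prod.ext_iff] <;> omega

theorem pvFold_rel (dist : Int) (hd : 1 ≤ dist) :
    ∀ (team : List Int) (bal ans : Int),
      (team.foldl (pvStepA dist) (max bal 0, max (-bal) 0, ans)).2.2 =
        (team.foldl (pvStepB dist) (bal, ans)).2 := by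
  intro team
  induction team with
  | nil => intro bal ans; simp
  | cons x xs ih =>
    intro bal ans
    simp only [List.foldl_cons, pvStep_rel dist hd bal ans x]
    exact ih (pvStepB dist (bal, ans) x).1 (pvStepB dist (bal, ans) x).2

-- balance stays in [-dist, dist] through a fold over runs with nonnegative lengths
theorem pvFoldR_bound (dist : Int) (hd : 0 ≤ dist) :
    ∀ (l : List (Bool × Int)) (s : Int × Int), (∀ r ∈ l, 0 ≤ r.2) →
      -dist ≤ s.1 → s.1 ≤ dist →
      -dist ≤ (l.foldl (pvStepR dist) s).1 ∧ (l.foldl (pvStepR dist) s).1 ≤ dist := by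
  intro l
  induction l with
  | nil => intro s _ h1 h2; exact ⟨h1, h2⟩
  | cons r rs ih =>
    intro s hk h1 h2
    have hr : 0 ≤ r.2 := hk r (List.mem_cons_self)
    have hrest : ∀ r' ∈ rs, 0 ≤ r'.2 := fun r' hm => hk r' (List.mem_cons_of_mem _ hm)
    simp only [List.foldl_cons]
    apply ih _ hrest
    · unfold pvStepR; split_ifs <;> simp only [] <;> omega
    · unfold pvStepR; split_ifs <;> simp only [] <;> omega

-- extending a run by one element = one balance step after the run
theorem pvRun_extend (dist : Int) (hd : 1 ≤ dist) (s : Int × Int) (k x : Int) (t : Bool)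
    (hb1 : -dist ≤ s.1) (hb2 : s.1 ≤ dist) (hk : 0 ≤ k) (ht : t = decide (x ≠ 0)) :
    pvStepR dist s (t, k + 1) = pvStepB dist (pvStepR dist s (t, k)) x := by
  obtain ⟨bal, ans⟩ := s
  simp only at hb1 hb2
  subst ht
  unfold pvStepR pvStepB
  rcases eq_or_ne x 0 with hx | hx <;>
    simp only [hx, ne_eq, decide_true, not_true_eq_false, not_false_eq_true, decide_false,
      if_true, if_false, Bool.false_eq_true] <;>
    split_ifs <;> (try simp only [Prod.mk.injEq]) <;> constructor <;> omega

-- a fresh length-1 run = one balance step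
theorem pvRun_one (dist : Int) (hd : 1 ≤ dist) (s : Int × Int) (x : Int) (t : Bool)
    (hb1 : -dist ≤ s.1) (hb2 : s.1 ≤ dist) (ht : t = decide (x ≠ 0)) :
    pvStepR dist s (t, 1) = pvStepB dist s x := by
  obtain ⟨bal, ans⟩ := s
  simp only at hb1 hb2
  subst ht
  unfold pvStepR pvStepB
  rcases eq_or_ne x 0 with hx | hx <;>
    simp only [hx, ne_eq, decide_true, not_true_eq_false, not_false_eq_true, decide_false,
      if_true, if_false, Bool.false_eq_true] <;>
    split_ifs <;> (try simp only [Prod.mk.injEq]) <;> constructor <;> omega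

-- run lengths in the accumulator are ≥ 1, preserved by pvAddRun
theorem pvAddRun_pos (acc : List (Bool × Int)) (x : Int) (h : ∀ r ∈ acc, 1 ≤ r.2) :
    ∀ r ∈ pvAddRun acc x, 1 ≤ r.2 := by
  intro r hr
  cases acc with
  | nil =>
      simp only [pvAddRun, List.mem_singleton] at hr
      subst hr; simp
  | cons p rest =>
      obtain ⟨t, k⟩ := p
      have hk : 1 ≤ k := h (t, k) List.mem_cons_self
      have hrest : ∀ r' ∈ rest, 1 ≤ r'.2 := fun r' hm => h r' (List.mem_cons_of_mem _ hm)
      simp only [pvAddRun] at hr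
      split_ifs at hr
      · rcases List.mem_cons.mp hr with h1 | h2
        · subst h1; simp; omega
        · exact hrest r h2
      · rcases List.mem_cons.mp hr with h1 | h2
        · subst h1; simp
        · rcases List.mem_cons.mp h2 with h3 | h4
          · subst h3; exact hk
          · exact hrest r h4

-- main correspondence: folding runs (built via the reversed accumulator) = folding balance steps
theorem pvRuns_fold (dist : Int) (hd : 1 ≤ dist) :
    ∀ (team : List Int) (acc : List (Bool × Int)) (s : Int × Int),
      (∀ r ∈ acc, 1 ≤ r.2) → -dist ≤ s.1 → s.1 ≤ dist →
      ((team.foldl pvAddRun acc).reverse).foldl (pvStepR dist) s =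
        team.foldl (pvStepB dist) ((acc.reverse).foldl (pvStepR dist) s) := by
  intro team
  induction team with
  | nil => intro acc s _ _ _; simp
  | cons x xs ih =>
    intro acc s hacc h1 h2
    simp only [List.foldl_cons]
    rw [ih (pvAddRun acc x) s (pvAddRun_pos acc x hacc) h1 h2]
    congr 1
    have hnn : ∀ r ∈ acc.reverse, 0 ≤ r.2 := by
      intro r hr; exact le_trans (by omega) (hacc r (List.mem_reverse.mp hr))
    match acc, hacc with
    | [], _ =>
        show ([(decide (x ≠ 0), 1)]).reverse.foldl (pvStepR dist) s = pvStepB dist ([].reverse.foldl (pvStepR dist) s) x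
        simp only [List.reverse_cons, List.reverse_nil, List.nil_append, List.foldl_cons,
          List.foldl_nil]
        exact pvRun_one dist hd s x _ h1 h2 rfl
    | (t, k) :: rest, hacc =>
        have hrest : ∀ r ∈ rest.reverse, 0 ≤ r.2 := by
          intro r hr
          exact le_trans (by omega) (hacc r (List.mem_cons_of_mem _ (List.mem_reverse.mp hr)))
        have hk : 1 ≤ k := hacc (t, k) (List.mem_cons_self)
        obtain ⟨hs1, hs2⟩ := pvFoldR_bound dist (by omega) rest.reverse s hrest h1 h2
        set s' := rest.reverse.foldl (pvStepR dist) s with hs'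
        by_cases htx : t = decide (x ≠ 0)
        · simp only [pvAddRun, if_pos htx, List.reverse_cons, List.foldl_append,
            List.foldl_cons, List.foldl_nil, ← hs']
          exact pvRun_extend dist hd s' k x t hs1 hs2 (by omega) htx
        · simp only [pvAddRun, if_neg htx, List.reverse_cons, List.foldl_append,
            List.foldl_cons, List.foldl_nil, ← hs']
          set s'' := pvStepR dist s' (t, k) with hs''
          obtain ⟨hu1, hu2⟩ : -dist ≤ s''.1 ∧ s''.1 ≤ dist := by
            rw [hs'']; unfold pvStepR; split_ifs <;> simp <;> omega
          exact pvRun_one dist hd s'' x _ hu1 hu2 rfl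

-- ===== VERDICT (by name: the statement is the Claim_ definition above) =====
theorem catchMaximumAmountofPeople_spec : Claim_equal_catchMaximumAmountofPeople := by
  intro team dist _
  unfold Spec_catchMaximumAmountofPeople catchMaximumAmountofPeople catchMaximumAmountofPeople_alt
  by_cases hd : dist ≤ 0
  · simp only [hd, if_true]
    exact pvA_nonpos dist hd team 0 0 0 le_rfl le_rfl
  · simp only [hd, if_false]
    have h1 : (1:Int) ≤ dist := by omega
    have hr := pvRuns_fold dist h1 team [] (0, 0) (by simp) (by omega) (by omega)
    simp only [List.reverse_nil, List.foldl_nil] at hr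
    rw [hr]
    have := pvFold_rel dist h1 team 0 0
    simpa using this
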